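-- pv_equiv track=rewrite | github.com/SaarShai/Primes-Equispaced | experiments/large_sieve_R_bound.py | ramanujan_sum
-- ===== SOURCE A (Python) =====
-- from math import gcd, floor, sqrt, pi, log, isqrt
--
-- def ramanujan_sum(q, n):
--     """Compute c_q(n) = Sum_{gcd(a,q)=1} e(an/q) = Sum_{d|gcd(n,q)} d*mu(q/d)."""
--     g = gcd(n, q)
--     result = 0
--     for d in range(1, g + 1):
--         if g % d == 0 and q % d == 0:
--             qd = q // d
--             # mu(qd) via trial division
--             mu_val = 1
--             temp = qd
--             for p in range(2, isqrt(temp) + 1):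
--                 if temp % p == 0:
--                     temp //= p
--                     if temp % p == 0:
--                         mu_val = 0
--                         break
--                     mu_val = -mu_val
--             if mu_val != 0 and temp > 1:
--                 mu_val = -mu_val
--             result += d * mu_val
--     return result
-- ===== SOURCE B (Python) =====
-- from math import gcd
--
-- def ramanujan_sum(q, n):
--     """c_q(n) via one factorization of q: c_q(n) is multiplicative in q and
--     c_{p^a}(n) has a closed form from a = v_p(q) and c = v_p(gcd(n,q))."""
--     g = gcd(n, q)
--     t = q
--     result = 1
--     p = 2
--     while p * p <= t:
--         if t % p == 0:
--             a = 0
--             while t % p == 0: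
--                 t //= p
--                 a += 1
--             c = 0
--             gg = g
--             while gg % p == 0:
--                 gg //= p
--                 c += 1
--             if a == c:
--                 result *= p ** a - p ** (a - 1)
--             elif a == c + 1:
--                 result *= -(p ** (a - 1))
--             else:
--                 return 0
--         p += 1
--     if t > 1:
--         result *= (t - 1) if g % t == 0 else -1
--     return result
-- ===== Notes on version B (the rewrite author's own statement) =====
-- stated objective: faster
-- what changed: Instead of summing d*mu(q/d) over every d up to gcd(n,q) with a fresh trial-division Moebius computation per divisor, B factorizes q once and multiplies a closed-form local factor c_{p^a}(n) per prime (Ramanujan sums are multiplicative in q).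
-- outside the precondition, e.g. on ramanujan_sum(0, 6): A returns 12, B returns 1; on ramanujan_sum(0, 0): A returns 0, B returns 1; on ramanujan_sum(-4, 6): A raises ValueError, B returns 1
import Mathlib
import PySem

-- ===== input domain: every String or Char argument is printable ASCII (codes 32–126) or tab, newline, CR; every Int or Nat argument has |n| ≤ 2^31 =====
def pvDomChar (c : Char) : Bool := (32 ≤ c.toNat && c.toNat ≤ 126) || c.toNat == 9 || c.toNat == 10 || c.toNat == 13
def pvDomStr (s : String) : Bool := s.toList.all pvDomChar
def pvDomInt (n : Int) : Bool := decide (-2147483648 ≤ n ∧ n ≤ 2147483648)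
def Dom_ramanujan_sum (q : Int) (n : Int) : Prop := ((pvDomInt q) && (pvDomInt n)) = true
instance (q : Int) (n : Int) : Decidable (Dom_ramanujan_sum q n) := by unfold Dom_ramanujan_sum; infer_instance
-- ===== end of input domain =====

-- B replaces A's loop over every d up to gcd(n,q) (with a fresh trial-division Moebius computation
-- per divisor) by a single factorization of q with a closed-form local factor per prime;
-- equivalence of the return values is proved for q ≥ 1.

-- ===== PORT A =====
-- the body of A's inner 'for p in range(2, isqrt(temp)+1)' loop, state (mu_val, temp, broken);
-- isqrt(temp) is Nat.sqrt temp.toNat, exact for temp ≥ 0 (under Pre_ the inputs q//d here are ≥ 1)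
def pvMuAStep (st : Int × Int × Bool) (p : Int) : Int × Int × Bool :=
  if st.2.2 then st
  else if PySem.Int.mod st.2.1 p = 0 then
    if PySem.Int.mod (PySem.Int.floordiv st.2.1 p) p = 0 then (0, PySem.Int.floordiv st.2.1 p, true)
    else (-st.1, PySem.Int.floordiv st.2.1 p, false)
  else st

-- A's 'mu(qd) via trial division' block
def pvMuA (qd : Int) : Int :=
  let st := (PySem.List.pyRange 2 ((Nat.sqrt qd.toNat : Int) + 1) 1).foldl pvMuAStep (1, qd, false)
  if st.1 ≠ 0 ∧ st.2.1 > 1 then -st.1 else st.1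

def ramanujan_sum (q : Int) (n : Int) : Int :=
  let g : Int := Int.gcd n q
  (PySem.List.pyRange 1 (g + 1) 1).foldl
    (fun result d =>
      if PySem.Int.mod g d = 0 ∧ PySem.Int.mod q d = 0 then
        result + d * pvMuA (PySem.Int.floordiv q d)
      else result)
    0

-- ===== PORT B =====
-- B's 'while x % p == 0: x //= p; k += 1' loops (fuel exceeds the iteration count on the proved domain)
def pvValLoop (fuel : Nat) (x : Int) (p : Int) (k : Int) : Int × Int :=
  match fuel with
  | 0 => (x, k)
  | f + 1 =>
    if PySem.Int.mod x p = 0 then pvValLoop f (PySem.Int.floordiv x p) p (k + 1) else (x, k)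

-- B's 'while p * p <= t' loop, with the early 'return 0'
def pvFacLoop (fuel : Nat) (p : Int) (t : Int) (g : Int) (result : Int) : Int :=
  match fuel with
  | 0 => result
  | f + 1 =>
    if p * p ≤ t then
      if PySem.Int.mod t p = 0 then
        let ta := pvValLoop (t.toNat + 1) t p 0
        let gc := pvValLoop (g.toNat + 1) g p 0
        if ta.2 = gc.2 then
          pvFacLoop f (p + 1) ta.1 g (result * (p ^ ta.2.toNat - p ^ (ta.2 - 1).toNat))
        else if ta.2 = gc.2 + 1 then
          pvFacLoop f (p + 1) ta.1 g (result * (-(p ^ (ta.2 - 1).toNat)))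
        else 0
      else pvFacLoop f (p + 1) t g result
    else
      if t > 1 then
        if PySem.Int.mod g t = 0 then result * (t - 1) else result * (-1)
      else result

def ramanujan_sum_alt (q : Int) (n : Int) : Int :=
  let g : Int := Int.gcd n q
  pvFacLoop (q.toNat + 2) 2 q g 1

-- ===== PRECONDITION & SPEC =====
-- Pre_ excludes q ≤ 0: for q < 0 A raises ValueError (isqrt of a negative), and at q = 0 the
-- Ramanujan sum c_q(n) is undefined, so neither program's value is specified there
-- (A happens to return the divisor sum of |n|, B happens to return 1).
def Pre_ramanujan_sum (q : Int) (n : Int) : Prop := 1 ≤ q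
instance (q : Int) (n : Int) : Decidable (Pre_ramanujan_sum q n) := by unfold Pre_ramanujan_sum; infer_instance
def pvWitness_ramanujan_sum : Int × Int := (12, 8)

def Spec_ramanujan_sum (q : Int) (n : Int) (out : Int) : Prop := out = ramanujan_sum_alt q n
instance (q : Int) (n : Int) (out : Int) : Decidable (Spec_ramanujan_sum q n out) := by unfold Spec_ramanujan_sum; infer_instance

-- ===== CLAIM (what is proved, stated in full; the proofs are below) =====
def Claim_equal_ramanujan_sum : Prop := ∀ (q : Int) (n : Int), Dom_ramanujan_sum q n → Pre_ramanujan_sum q n → Spec_ramanujan_sum q n (ramanujan_sum q n)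

-- ===== LEMMAS AND PROOFS =====

-- μ as an abbreviation, and the per-prime local factor c_{p^a}(n) with c = v_p(gcd(n,q))
def pvMu (k : ℕ) : ℤ := ArithmeticFunction.moebius k

def pvLocal (p a c : ℕ) : ℤ :=
  if a = c then (p : ℤ) ^ a - (p : ℤ) ^ (a - 1)
  else if a = c + 1 then -(p : ℤ) ^ (a - 1) else 0

def pvF (G : ℕ) : ArithmeticFunction ℤ :=
  ⟨fun d => if d ∣ G then (d : ℤ) else 0, by by_cases h : (0:ℕ) ∣ G <;> simp [h]⟩

lemma pvF_apply (G d : ℕ) : pvF G d = if d ∣ G then (d : ℤ) else 0 := rfl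

lemma pvF_mult (G : ℕ) : (pvF G).IsMultiplicative := by
  constructor
  · simp [pvF_apply]
  · intro m n h
    simp only [pvF_apply]
    by_cases h1 : m ∣ G <;> by_cases h2 : n ∣ G
    · have h3 : m * n ∣ G := Nat.Coprime.mul_dvd_of_dvd_of_dvd h h1 h2
      simp only [h1, h2, h3, if_true]; push_cast; ring
    · have h3 : ¬ m * n ∣ G := fun hc => h2 ((dvd_mul_left n m).trans hc)
      simp [h1, h2, h3]
    · have h3 : ¬ m * n ∣ G := fun hc => h1 ((dvd_mul_right m n).trans hc)
      simp [h1, h2, h3]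
    · have h3 : ¬ m * n ∣ G := fun hc => h1 ((dvd_mul_right m n).trans hc)
      simp [h1, h2, h3]

def pvC (G : ℕ) : ArithmeticFunction ℤ := pvF G * ArithmeticFunction.moebius

lemma pvC_mult (G : ℕ) : (pvC G).IsMultiplicative :=
  (pvF_mult G).mul ArithmeticFunction.isMultiplicative_moebius

lemma pvC_eq_sum (G Q : ℕ) (hQ : Q ≠ 0) (hG : G ≠ 0) (hdvd : G ∣ Q) :
    pvC G Q = ∑ d ∈ G.divisors, (d : ℤ) * pvMu (Q / d) := by
  have h1 : pvC G Q = ∑ d ∈ Q.divisors, pvF G d * pvMu (Q / d) := by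
    rw [pvC, ArithmeticFunction.mul_apply]
    exact Nat.sum_divisorsAntidiagonal (fun a b => pvF G a * pvMu b)
  rw [h1]
  have h2 : G.divisors = Q.divisors.filter (· ∣ G) := by
    ext e
    simp only [Nat.mem_divisors, Finset.mem_filter]
    constructor
    · exact fun ⟨he, _⟩ => ⟨⟨he.trans hdvd, hQ⟩, he⟩
    · exact fun ⟨⟨_, _⟩, he⟩ => ⟨he, hG⟩
  rw [h2, Finset.sum_filter]
  refine Finset.sum_congr rfl fun d _ => ?_
  simp only [pvF_apply]
  split_ifs <;> simp

lemma pvC_prime_pow (G : ℕ) (hG : G ≠ 0) (p a : ℕ) (hp : p.Prime) (ha : 1 ≤ a)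
    (hca : G.factorization p ≤ a) :
    pvC G (p ^ a) = pvLocal p a (G.factorization p) := by
  have key : pvC G (p ^ a) =
      ∑ j ∈ Finset.range (a + 1), pvF G (p ^ j) * pvMu (p ^ (a - j)) := by
    have h1 : pvC G (p ^ a) = ∑ d ∈ (p ^ a).divisors, pvF G d * pvMu (p ^ a / d) := by
      rw [pvC, ArithmeticFunction.mul_apply]
      exact Nat.sum_divisorsAntidiagonal (fun a b => pvF G a * pvMu b)
    rw [h1, Nat.divisors_prime_pow hp, Finset.sum_map]
    refine Finset.sum_congr rfl fun j hj => ?_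
    simp only [Function.Embedding.coeFn_mk]
    rw [Nat.pow_div (by simpa using Nat.lt_succ_iff.mp (Finset.mem_range.mp hj)) hp.pos]
  rw [key]
  have hsub : ({a - 1, a} : Finset ℕ) ⊆ Finset.range (a + 1) := by
    intro x hx; simp at hx; rcases hx with h | h <;> simp [h] <;> omega
  have hz : ∀ j ∈ Finset.range (a + 1), j ∉ ({a - 1, a} : Finset ℕ) →
      pvF G (p ^ j) * pvMu (p ^ (a - j)) = 0 := by
    intro j hj hjn
    simp only [Finset.mem_insert, Finset.mem_singleton] at hjn
    push_neg at hjn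
    have h2 : a - j ≠ 0 := by simp at hj; omega
    have h3 : a - j ≠ 1 := by simp at hj; omega
    have : pvMu (p ^ (a - j)) = 0 := by
      rw [pvMu, ArithmeticFunction.moebius_apply_prime_pow hp h2]
      simp [h3]
    simp [this]
  rw [← Finset.sum_subset hsub hz]
  have hne : a - 1 ∉ ({a} : Finset ℕ) := by simp; omega
  rw [Finset.sum_insert hne, Finset.sum_singleton]
  have e1 : a - (a - 1) = 1 := by omega
  have e2 : a - a = 0 := by omega
  rw [e1, e2]
  have m1 : pvMu (p ^ 1) = -1 := by
    rw [pvMu, ArithmeticFunction.moebius_apply_prime_pow hp one_ne_zero]; simp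
  have m0 : pvMu (p ^ 0) = 1 := by simp [pvMu]
  rw [m1, m0]
  have hdvd_iff : ∀ j : ℕ, p ^ j ∣ G ↔ j ≤ G.factorization p :=
    fun j => hp.pow_dvd_iff_le_factorization hG
  set c := G.factorization p with hc
  clear_value c
  simp only [pvF_apply, hdvd_iff, pvLocal]
  split_ifs <;> first | (exfalso; omega) | (push_cast; ring) | norm_num

lemma pv_identity (Q G : ℕ) (hQ : 1 ≤ Q) (hG : 1 ≤ G) (hdvd : G ∣ Q) :
    ∑ d ∈ G.divisors, (d : ℤ) * pvMu (Q / d) =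
      ∏ p ∈ Q.primeFactors, pvLocal p (Q.factorization p) (G.factorization p) := by
  rw [← pvC_eq_sum G Q (by omega) (by omega) hdvd]
  rw [(pvC_mult G).multiplicative_factorization (pvC G) (by omega : Q ≠ 0)]
  rw [Nat.prod_factorization_eq_prod_primeFactors]
  refine Finset.prod_congr rfl fun p hp => ?_
  obtain ⟨hpp, hpQ, hQ0⟩ := Nat.mem_primeFactors.mp hp
  exact pvC_prime_pow G (by omega) p _ hpp
    (Nat.Prime.factorization_pos_of_dvd hpp hQ0 hpQ)
    ((Nat.factorization_le_iff_dvd (by omega) hQ0).mpr hdvd p)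

-- casts
lemma pv_mod_natCast_eq_zero (x y : ℕ) : PySem.Int.mod (x:ℤ) (y:ℤ) = 0 ↔ y ∣ x := by
  rw [PySem.Int.mod_natCast, Nat.cast_eq_zero]
  exact (Nat.dvd_iff_mod_eq_zero).symm

lemma pvMuAStep_broken (l : List Int) (st : Int × Int × Bool) (h : st.2.2 = true) :
    l.foldl pvMuAStep st = st := by
  induction l with
  | nil => rfl
  | cons x xs ih => simp [List.foldl_cons, pvMuAStep, h, ih]

lemma pvMu_prime {p : ℕ} (hp : p.Prime) : pvMu p = -1 :=
  ArithmeticFunction.moebius_apply_prime hp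

lemma pvMu_mul_prime {u p : ℕ} (hp : p.Prime) (hpu : ¬ p ∣ u) : pvMu (u * p) = -pvMu u := by
  have hco : u.Coprime p := (Nat.coprime_comm.mp ((Nat.Prime.coprime_iff_not_dvd hp).mpr hpu))
  rw [pvMu, ArithmeticFunction.isMultiplicative_moebius.map_mul_of_coprime hco]
  rw [← pvMu, ← pvMu, pvMu_prime hp]; ring

lemma pvMu_loop (K : ℕ) (hK : 1 ≤ K) :
    ∀ (n p u t : ℕ), 2 ≤ p → Nat.sqrt K + 1 - p = n → u * t = K →
      Squarefree u →
      (∀ r, r.Prime → r ∣ u → r < p) →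
      (∀ r, r.Prime → r ∣ t → p ≤ r) →
      ((fun st => if st.1 ≠ 0 ∧ st.2.1 > 1 then -st.1 else st.1)
        (((PySem.List.pyRange (p:ℤ) ((Nat.sqrt K : ℤ) + 1) 1).foldl pvMuAStep
          (pvMu u, (t:ℤ), false))) = pvMu K) := by
  intro n
  induction n with
  | zero =>
    intro p u t hp hn huv hsf hu ht
    have hple : Nat.sqrt K + 1 ≤ p := by omega
    rw [PySem.List.pyRange_one_eq_nil (by exact_mod_cast hple)]
    simp only [List.foldl_nil]
    have ht1 : 1 ≤ t := by
      rcases Nat.eq_zero_or_pos t with h | h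
      · subst h; simp at huv; omega
      · exact h
    have hmune : pvMu u ≠ 0 :=
      ArithmeticFunction.moebius_ne_zero_iff_squarefree.mpr hsf
    by_cases h1 : t = 1
    · subst h1
      simp only [mul_one] at huv; subst huv
      simp [hmune]
    · -- t > 1: t is prime
      have htgt : 1 < t := by omega
      have htK : t ∣ K := Dvd.intro_left u huv
      have htprime : t.Prime := by
        by_contra hnp
        have hmf := Nat.minFac_prime h1
        have hmfd : t.minFac ∣ t := Nat.minFac_dvd t
        have hge : p ≤ t.minFac := ht _ hmf hmfd
        have hsq : t.minFac ^ 2 ≤ t := Nat.minFac_sq_le_self (by omega) hnp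
        have htle : t ≤ K := Nat.le_of_dvd (by omega) htK
        have : K < (Nat.sqrt K + 1) ^ 2 := Nat.lt_succ_sqrt' K
        nlinarith [hsq, htle, hge, hple]
      have hptu : ¬ t ∣ u := fun hd => absurd (hu t htprime hd) (by have := ht t htprime dvd_rfl; omega)
      have : pvMu K = -pvMu u := by
        rw [← huv, pvMu_mul_prime htprime hptu]
      rw [this]
      have : ((t:ℤ) > 1) := by exact_mod_cast htgt
      simp [hmune, this]
  | succ m ih =>
    intro p u t hp hn huv hsf hu ht
    have hplt : (p:ℤ) < (Nat.sqrt K : ℤ) + 1 := by exact_mod_cast (by omega : p < Nat.sqrt K + 1)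
    rw [PySem.List.pyRange_one_cons hplt]
    simp only [List.foldl_cons]
    have ht1 : 1 ≤ t := by
      rcases Nat.eq_zero_or_pos t with h | h
      · subst h; simp at huv; omega
      · exact h
    by_cases hdvd : p ∣ t
    · -- p divides t; p is prime
      have hpprime : p.Prime := by
        have hmf := Nat.minFac_prime (by omega : p ≠ 1)
        have hge : p ≤ p.minFac := ht _ hmf ((Nat.minFac_dvd p).trans hdvd)
        have hle : p.minFac ≤ p := Nat.minFac_le (by omega)
        have : p.minFac = p := by omega
        rw [← this]; exact hmf
      have hmod : PySem.Int.mod ((t:ℕ):ℤ) (p:ℤ) = 0 := (pv_mod_natCast_eq_zero _ _).mpr hdvd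
      by_cases hdvd2 : p ∣ (t / p)
      · -- break: μ K = 0 since p^2 ∣ K
        have hm2 : PySem.Int.mod ((t/p : ℕ):ℤ) (p:ℤ) = 0 := (pv_mod_natCast_eq_zero _ _).mpr hdvd2
        have hstep : pvMuAStep (pvMu u, (t:ℤ), false) (p:ℤ) = ((0:ℤ), ((t/p : ℕ):ℤ), true) := by
          simp only [pvMuAStep]
          rw [if_neg (by simp), PySem.Int.floordiv_natCast, if_pos hmod, if_pos hm2]
        rw [hstep, pvMuAStep_broken _ _ rfl]
        have hsq : p * p ∣ t := by
          obtain ⟨k, hk⟩ := hdvd2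
          exact ⟨k, by rw [mul_assoc, ← hk, Nat.mul_div_cancel' hdvd]⟩
        have hnotsf : ¬ Squarefree K := by
          intro hsf'
          exact hpprime.one_lt.ne' (Nat.isUnit_iff.mp (hsf' p (hsq.trans (Dvd.intro_left u huv)))) |>.elim
        have : pvMu K = 0 := ArithmeticFunction.moebius_eq_zero_of_not_squarefree hnotsf
        simp [this]
      · -- continue with u' = u * p, t' = t / p
        have hm2 : ¬ PySem.Int.mod ((t/p : ℕ):ℤ) (p:ℤ) = 0 :=
          fun hc => hdvd2 ((pv_mod_natCast_eq_zero _ _).mp hc)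
        have hstep : pvMuAStep (pvMu u, (t:ℤ), false) (p:ℤ) = (-pvMu u, ((t/p : ℕ):ℤ), false) := by
          simp only [pvMuAStep]
          rw [if_neg (by simp), PySem.Int.floordiv_natCast, if_pos hmod, if_neg hm2]
        rw [hstep]
        have hpu : ¬ p ∣ u := fun hd => absurd (hu p hpprime hd) (by omega)
        have hmu' : -pvMu u = pvMu (u * p) := (pvMu_mul_prime hpprime hpu).symm
        rw [hmu']
        have hrec := ih (p+1) (u*p) (t/p) (by omega) (by omega)
          (by rw [mul_assoc, Nat.mul_div_cancel' hdvd]; exact huv)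
          ((Nat.squarefree_mul ((Nat.coprime_comm.mp ((Nat.Prime.coprime_iff_not_dvd hpprime).mpr hpu)))).mpr
            ⟨hsf, hpprime.squarefree⟩)
          (fun r hr hru => by
            rcases (Nat.Prime.dvd_mul hr).mp hru with h | h
            · exact lt_trans (hu r hr h) (by omega)
            · rw [Nat.prime_dvd_prime_iff_eq hr hpprime] at h; omega)
          (fun r hr hrt => by
            have h1 : p ≤ r := ht r hr (hrt.trans (Nat.div_dvd_of_dvd hdvd))
            have h2 : r ≠ p := fun he => hdvd2 (he ▸ hrt)
            omega)
        exact_mod_cast hrec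
    · -- p does not divide t: state unchanged
      have hstep : pvMuAStep (pvMu u, (t:ℤ), false) (p:ℤ) = (pvMu u, (t:ℤ), false) := by
        simp only [pvMuAStep]
        rw [if_neg (by simp)]
        rw [if_neg (by rw [pv_mod_natCast_eq_zero]; exact hdvd)]
      rw [hstep]
      have hrec := ih (p+1) u t (by omega) (by omega) huv hsf
        (fun r hr hru => lt_trans (hu r hr hru) (by omega))
        (fun r hr hrt => by
          have h1 : p ≤ r := ht r hr hrt
          have h2 : r ≠ p := fun he => hdvd (he ▸ hrt)
          omega)
      exact_mod_cast hrec

lemma pvMuA_eq (K : ℕ) (hK : 1 ≤ K) : pvMuA (K : Int) = pvMu K := by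
  have h := pvMu_loop K hK (Nat.sqrt K + 1 - 2) 2 1 K (by omega) rfl (one_mul K)
    squarefree_one
    (fun r hr hru => absurd (Nat.le_of_dvd one_pos hru) (by have := hr.two_le; omega))
    (fun r hr _ => hr.two_le)
  simp only [pvMu, ArithmeticFunction.moebius_apply_one] at h
  simpa [pvMuA, Int.toNat_natCast] using h

lemma pv_sum_loop (Q G : ℕ) (hQ : 1 ≤ Q) (hG : 1 ≤ G) (hdvd : G ∣ Q) :
    ∀ b : ℕ, (PySem.List.pyRange 1 ((b:ℤ) + 1) 1).foldl
        (fun result d => if PySem.Int.mod (G:ℤ) d = 0 ∧ PySem.Int.mod (Q:ℤ) d = 0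
          then result + d * pvMuA (PySem.Int.floordiv (Q:ℤ) d) else result) 0
      = ∑ d ∈ G.divisors.filter (· ≤ b), (d:ℤ) * pvMu (Q / d) := by
  intro b
  induction b with
  | zero =>
    have h0 : G.divisors.filter (· ≤ 0) = ∅ := by
      apply Finset.filter_false_of_mem
      intro d hd
      have := Nat.pos_of_mem_divisors hd
      omega
    rw [PySem.List.pyRange_one_eq_nil (by norm_num), List.foldl_nil, h0, Finset.sum_empty]
  | succ b ih =>
    have hcast : ((b + 1 : ℕ) : ℤ) + 1 = ((b : ℤ) + 1) + 1 := by push_cast; ring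
    rw [hcast, PySem.List.pyRange_one_succ_right (by omega : (1:ℤ) ≤ (b:ℤ) + 1),
      List.foldl_append]
    rw [ih]
    simp only [List.foldl_cons, List.foldl_nil]
    have hb1 : ((b:ℤ) + 1) = ((b + 1 : ℕ) : ℤ) := by push_cast; ring
    by_cases hc : (b + 1) ∣ G
    · have hcQ : (b + 1) ∣ Q := hc.trans hdvd
      have hcond : PySem.Int.mod (G:ℤ) ((b:ℤ)+1) = 0 ∧ PySem.Int.mod (Q:ℤ) ((b:ℤ)+1) = 0 := by
        rw [hb1]
        exact ⟨(pv_mod_natCast_eq_zero _ _).mpr hc, (pv_mod_natCast_eq_zero _ _).mpr hcQ⟩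
      rw [if_pos hcond]
      have hdivQ : 1 ≤ Q / (b + 1) := Nat.one_le_div_iff (by omega) |>.mpr (Nat.le_of_dvd (by omega) hcQ)
      have hval : ((b:ℤ)+1) * pvMuA (PySem.Int.floordiv (Q:ℤ) ((b:ℤ)+1)) =
          ((b+1 : ℕ):ℤ) * pvMu (Q / (b+1)) := by
        rw [hb1, PySem.Int.floordiv_natCast, pvMuA_eq _ hdivQ]
      rw [hval]
      have hfilter : G.divisors.filter (· ≤ b + 1) =
          insert (b+1) (G.divisors.filter (· ≤ b)) := by
        ext d
        simp only [Finset.mem_filter, Finset.mem_insert, Nat.mem_divisors]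
        constructor
        · rintro ⟨⟨h1, h2⟩, h3⟩
          by_cases hd : d = b + 1
          · exact Or.inl hd
          · exact Or.inr ⟨⟨h1, h2⟩, by omega⟩
        · rintro (h | ⟨⟨h1, h2⟩, h3⟩)
          · exact ⟨⟨h ▸ hc, by omega⟩, by omega⟩
          · exact ⟨⟨h1, h2⟩, by omega⟩
      rw [hfilter, Finset.sum_insert (by simp)]
      ring
    · have hcond : ¬ (PySem.Int.mod (G:ℤ) ((b:ℤ)+1) = 0 ∧ PySem.Int.mod (Q:ℤ) ((b:ℤ)+1) = 0) := by
        rw [hb1]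
        rintro ⟨h1, _⟩
        exact hc ((pv_mod_natCast_eq_zero _ _).mp h1)
      rw [if_neg hcond]
      congr 1
      ext d
      simp only [Finset.mem_filter, Nat.mem_divisors]
      constructor
      · rintro ⟨⟨h1, h2⟩, h3⟩
        exact ⟨⟨h1, h2⟩, le_trans h3 (Nat.le_succ b)⟩
      · rintro ⟨⟨h1, h2⟩, h3⟩
        refine ⟨⟨h1, h2⟩, ?_⟩
        rcases Nat.lt_or_ge d (b+1) with h | h
        · omega
        · have : d = b + 1 := by omega
          exact absurd (this ▸ h1) hc

lemma ramanujan_sum_eq_sum (q n : Int) (hq : 1 ≤ q) :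
    ramanujan_sum q n =
      ∑ d ∈ (Int.gcd n q).divisors, (d : ℤ) * pvMu (q.toNat / d) := by
  have hq0 : q ≠ 0 := by omega
  have hG : 1 ≤ Int.gcd n q := by
    have := Int.gcd_pos_of_ne_zero_right n hq0
    omega
  have hdvd : (Int.gcd n q : ℕ) ∣ q.toNat := by
    have h1 : (Int.gcd n q : Int) ∣ q := Int.gcd_dvd_right n q
    have h2 := Int.natAbs_dvd_natAbs.mpr h1
    have h3 : q.natAbs = q.toNat := by omega
    simpa [h3] using h2
  have hqQ : q = ((q.toNat : ℕ) : ℤ) := by omega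
  unfold ramanujan_sum
  have h := pv_sum_loop q.toNat (Int.gcd n q) (by omega) hG hdvd (Int.gcd n q)
  have hfull : (Int.gcd n q).divisors.filter (· ≤ Int.gcd n q) = (Int.gcd n q).divisors :=
    Finset.filter_true_of_mem (fun d hd => Nat.le_of_dvd (by omega) (Nat.mem_divisors.mp hd).1)
  rw [hfull] at h
  calc (PySem.List.pyRange 1 ((Int.gcd n q : ℤ) + 1) 1).foldl
        (fun result d => if PySem.Int.mod (Int.gcd n q : ℤ) d = 0 ∧ PySem.Int.mod q d = 0 then
          result + d * pvMuA (PySem.Int.floordiv q d) else result) 0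
      = ∑ d ∈ (Int.gcd n q).divisors, (d : ℤ) * pvMu (q.toNat / d) := by rw [hqQ] at *; exact h

lemma pv_mod_natCast_eq_zero' (x y : ℕ) : PySem.Int.mod (x:ℤ) (y:ℤ) = 0 ↔ y ∣ x := by
  rw [PySem.Int.mod_natCast, Nat.cast_eq_zero]
  exact (Nat.dvd_iff_mod_eq_zero).symm

-- one-step unfolding equations for B's loops (definitional)
lemma pvValLoop_succ (f : ℕ) (x p k : ℤ) :
    pvValLoop (f + 1) x p k =
      if PySem.Int.mod x p = 0 then pvValLoop f (PySem.Int.floordiv x p) p (k + 1) else (x, k) := rfl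

lemma pvFacLoop_succ (f : ℕ) (p t g result : ℤ) :
    pvFacLoop (f + 1) p t g result =
      if p * p ≤ t then
        if PySem.Int.mod t p = 0 then
          if (pvValLoop (t.toNat + 1) t p 0).2 = (pvValLoop (g.toNat + 1) g p 0).2 then
            pvFacLoop f (p + 1) (pvValLoop (t.toNat + 1) t p 0).1 g
              (result * (p ^ (pvValLoop (t.toNat + 1) t p 0).2.toNat -
                p ^ ((pvValLoop (t.toNat + 1) t p 0).2 - 1).toNat))
          else if (pvValLoop (t.toNat + 1) t p 0).2 = (pvValLoop (g.toNat + 1) g p 0).2 + 1 then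
            pvFacLoop f (p + 1) (pvValLoop (t.toNat + 1) t p 0).1 g
              (result * (-(p ^ ((pvValLoop (t.toNat + 1) t p 0).2 - 1).toNat)))
          else 0
        else pvFacLoop f (p + 1) t g result
      else
        if t > 1 then
          if PySem.Int.mod g t = 0 then result * (t - 1) else result * (-1)
        else result := rfl

lemma pvValLoop_eq (p : ℕ) (hp : p.Prime) :
    ∀ (x : ℕ), 1 ≤ x → ∀ (fuel : Nat) (k : ℤ), x ≤ fuel →
    pvValLoop fuel (x:ℤ) (p:ℤ) k =
      (((x / p ^ (x.factorization p) : ℕ) : ℤ), k + (x.factorization p : ℤ)) := by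
  intro x
  induction x using Nat.strong_induction_on with
  | _ x ih =>
    intro hx fuel k hfuel
    cases fuel with
    | zero => omega
    | succ f =>
      rw [pvValLoop_succ]
      by_cases hdvd : p ∣ x
      · have hv1 : 1 ≤ x.factorization p :=
          (hp.pow_dvd_iff_le_factorization (by omega)).mp (by simpa using hdvd)
        have hxp_lt : x / p < x := Nat.div_lt_self (by omega) hp.one_lt
        have hxp_pos : 1 ≤ x / p := Nat.one_le_div_iff hp.pos |>.mpr (Nat.le_of_dvd (by omega) hdvd)
        have hvdiv : (x / p).factorization p = x.factorization p - 1 := by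
          rw [Nat.factorization_div hdvd]
          simp [hp.factorization]
        rw [if_pos ((pv_mod_natCast_eq_zero' _ _).mpr hdvd), PySem.Int.floordiv_natCast]
        rw [ih (x/p) hxp_lt hxp_pos f (k+1) (Nat.lt_succ_iff.mp (lt_of_lt_of_le hxp_lt hfuel))]
        have hdiv : x / p / p ^ ((x/p).factorization p) = x / p ^ (x.factorization p) := by
          rw [hvdiv, Nat.div_div_eq_div_mul]
          congr 1
          rw [← pow_succ']
          congr 1
          omega
        rw [hdiv, Prod.mk.injEq]
        refine ⟨rfl, ?_⟩
        rw [hvdiv]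
        omega
      · have hv0 : x.factorization p = 0 := Nat.factorization_eq_zero_of_not_dvd hdvd
        rw [if_neg (fun hc => hdvd ((pv_mod_natCast_eq_zero' _ _).mp hc)), hv0]
        simp

lemma pv_filter_lt_succ_of_mem (Q p : ℕ) (hp : p.Prime) (hpQ : p ∣ Q) (hQ : Q ≠ 0) :
    Q.primeFactors.filter (· < p + 1) = insert p (Q.primeFactors.filter (· < p)) := by
  ext r
  simp only [Finset.mem_filter, Finset.mem_insert]
  constructor
  · rintro ⟨h1, h2⟩
    by_cases hr : r = p
    · exact Or.inl hr
    · exact Or.inr ⟨h1, by omega⟩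
  · rintro (h | ⟨h1, h2⟩)
    · exact ⟨h ▸ Nat.mem_primeFactors.mpr ⟨hp, hpQ, hQ⟩, by omega⟩
    · exact ⟨h1, by omega⟩

lemma pv_filter_lt_succ_of_not_mem (Q p : ℕ) (hp : p ∉ Q.primeFactors) :
    Q.primeFactors.filter (· < p + 1) = Q.primeFactors.filter (· < p) := by
  ext r
  simp only [Finset.mem_filter]
  constructor
  · rintro ⟨h1, h2⟩
    have : r ≠ p := fun he => hp (he ▸ h1)
    exact ⟨h1, by omega⟩
  · rintro ⟨h1, h2⟩
    exact ⟨h1, by omega⟩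

lemma pvFacLoop_eq (Q G : ℕ) (hQ : 1 ≤ Q) (hG : 1 ≤ G) (hGQ : G ∣ Q) :
    ∀ (fuel : ℕ) (p T U : ℕ), 2 ≤ p → p ≤ Nat.sqrt Q + 1 → Nat.sqrt Q + 3 ≤ fuel + p →
      T * U = Q →
      (∀ r, r.Prime → r ∣ T → p ≤ r) →
      (∀ r, r.Prime → r ∣ U → r < p) →
      pvFacLoop fuel (p:ℤ) (T:ℤ) (G:ℤ)
          (∏ r ∈ Q.primeFactors.filter (· < p), pvLocal r (Q.factorization r) (G.factorization r))
        = ∏ r ∈ Q.primeFactors, pvLocal r (Q.factorization r) (G.factorization r) := by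
  intro fuel
  induction fuel with
  | zero => intro p T U hp hple hfuel; omega
  | succ f ih =>
    intro p T U hp hple hfuel hTU hT hU
    have hT0 : 1 ≤ T := by
      rcases Nat.eq_zero_or_pos T with h | h
      · subst h; simp at hTU; omega
      · exact h
    have hU0 : 1 ≤ U := by
      rcases Nat.eq_zero_or_pos U with h | h
      · subst h; simp at hTU; omega
      · exact h
    have hTdvdQ : T ∣ Q := Dvd.intro U hTU
    have hTleQ : T ≤ Q := Nat.le_of_dvd (by omega) hTdvdQ
    rw [pvFacLoop_succ]
    by_cases hloop : p * p ≤ T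
    · -- loop body runs
      have hloopZ : (p:ℤ) * (p:ℤ) ≤ (T:ℤ) := by exact_mod_cast hloop
      have hpsqrt : p ≤ Nat.sqrt Q := Nat.le_sqrt.mpr (le_trans hloop hTleQ)
      rw [if_pos hloopZ]
      by_cases hdvdT : p ∣ T
      · -- p is prime; its full exponent is removed
        have hpprime : p.Prime := by
          have hmf := Nat.minFac_prime (by omega : p ≠ 1)
          have hge : p ≤ p.minFac := hT _ hmf ((Nat.minFac_dvd p).trans hdvdT)
          have hle : p.minFac ≤ p := Nat.minFac_le (by omega)
          have : p.minFac = p := by omega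
          rw [← this]; exact hmf
        rw [if_pos ((pv_mod_natCast_eq_zero' _ _).mpr hdvdT)]
        have hpU : ¬ p ∣ U := fun hd => absurd (hU p hpprime hd) (by omega)
        have hfacT : T.factorization p = Q.factorization p := by
          rw [← hTU, Nat.factorization_mul (by omega) (by omega)]
          simp [Nat.factorization_eq_zero_of_not_dvd hpU]
        have hvalT := pvValLoop_eq p hpprime T hT0 (T + 1) 0 (by omega)
        have hvalG := pvValLoop_eq p hpprime G hG (G + 1) 0 (by omega)
        rw [hfacT] at hvalT
        set a := Q.factorization p with ha
        set c := G.factorization p with hc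
        have ha1 : 1 ≤ a := by
          rw [← hfacT]
          exact (hpprime.pow_dvd_iff_le_factorization (by omega)).mp (by simpa using hdvdT)
        have hca : c ≤ a := by
          have h := (Nat.factorization_le_iff_dvd (by omega) (by omega)).mpr hGQ p
          rw [← ha, ← hc] at h
          exact h
        simp only [Int.toNat_natCast, hvalT, hvalG, zero_add]
        have hpQ : p ∣ Q := hdvdT.trans hTdvdQ
        have hmem : p ∈ Q.primeFactors := Nat.mem_primeFactors.mpr ⟨hpprime, hpQ, by omega⟩
        have hpow_dvd : p ^ a ∣ T :=
          (hpprime.pow_dvd_iff_le_factorization (by omega : T ≠ 0)).mpr (le_of_eq hfacT.symm)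
        have hT' : (T / p ^ a) * (U * p ^ a) = Q := by
          rw [← mul_assoc, mul_comm (T / p ^ a) U, mul_assoc, Nat.div_mul_cancel hpow_dvd,
            mul_comm U T, hTU]
        have hT'0 : 1 ≤ T / p ^ a :=
          Nat.one_le_div_iff (by positivity) |>.mpr (Nat.le_of_dvd (by omega) hpow_dvd)
        have hfacT' : (T / p ^ a).factorization p = 0 := by
          rw [Nat.factorization_div hpow_dvd]
          simp [Nat.Prime.factorization_pow, Finsupp.tsub_apply, Finsupp.single_eq_same,
            hfacT, hpprime.factorization_self]
        have hpT' : ¬ p ∣ (T / p ^ a) := fun hd => by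
          have h1 : p ^ 1 ∣ T / p ^ a := by rw [pow_one]; exact hd
          have := (hpprime.pow_dvd_iff_le_factorization (by omega : T / p ^ a ≠ 0)).mp h1
          omega
        have hT'cond : ∀ r, r.Prime → r ∣ (T / p ^ a) → p + 1 ≤ r := by
          intro r hr hrd
          have h1 : p ≤ r := hT r hr (hrd.trans (Nat.div_dvd_of_dvd hpow_dvd))
          have h2 : r ≠ p := fun he => hpT' (he ▸ hrd)
          omega
        have hU'cond : ∀ r, r.Prime → r ∣ (U * p ^ a) → r < p + 1 := by
          intro r hr hrd
          rcases (Nat.Prime.dvd_mul hr).mp hrd with h | h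
          · have := hU r hr h; omega
          · have := (Nat.prime_dvd_prime_iff_eq hr hpprime).mp (hr.dvd_of_dvd_pow h); omega
        have hprod_ins : ∏ r ∈ Q.primeFactors.filter (· < p + 1),
            pvLocal r (Q.factorization r) (G.factorization r)
            = (∏ r ∈ Q.primeFactors.filter (· < p),
                pvLocal r (Q.factorization r) (G.factorization r)) * pvLocal p a c := by
          rw [pv_filter_lt_succ_of_mem Q p hpprime hpQ (by omega),
            Finset.prod_insert (by simp)]
          rw [mul_comm, ha, hc]
        have hcastp : ((p:ℤ) + 1) = ((p + 1 : ℕ) : ℤ) := by push_cast; ring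
        by_cases hac : a = c
        · rw [if_pos (by exact_mod_cast hac)]
          have hX : (((a:ℕ):ℤ) - 1).toNat = a - 1 := by omega
          rw [hX]
          have hlocal : ((p:ℤ) ^ a - (p:ℤ) ^ (a - 1)) = pvLocal p a c := by
            rw [pvLocal, if_pos hac]
          rw [hlocal]
          have hrec := ih (p + 1) (T / p ^ a) (U * p ^ a) (by omega) (by omega) (by omega)
            hT' hT'cond hU'cond
          rw [hprod_ins] at hrec
          rw [hcastp]
          exact hrec
        · rw [if_neg (by exact_mod_cast hac)]
          by_cases hac1 : a = c + 1
          · rw [if_pos (by exact_mod_cast hac1)]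
            have hX : (((a:ℕ):ℤ) - 1).toNat = a - 1 := by omega
            rw [hX]
            have hlocal : (-((p:ℤ) ^ (a - 1))) = pvLocal p a c := by
              rw [pvLocal, if_neg hac, if_pos hac1]
            rw [hlocal]
            have hrec := ih (p + 1) (T / p ^ a) (U * p ^ a) (by omega) (by omega) (by omega)
              hT' hT'cond hU'cond
            rw [hprod_ins] at hrec
            rw [hcastp]
            exact hrec
          · rw [if_neg (by exact_mod_cast hac1)]
            have hzero : pvLocal p a c = 0 := by
              rw [pvLocal, if_neg hac, if_neg hac1]
            exact (Finset.prod_eq_zero hmem (by rw [← ha, ← hc]; exact hzero)).symm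
      · -- p does not divide T: skip
        rw [if_neg (fun hcon => hdvdT ((pv_mod_natCast_eq_zero' _ _).mp hcon))]
        have hnotmem : p ∉ Q.primeFactors := by
          intro hmem
          obtain ⟨hpp, hpQ, _⟩ := Nat.mem_primeFactors.mp hmem
          rw [← hTU] at hpQ
          rcases (Nat.Prime.dvd_mul hpp).mp hpQ with h | h
          · exact hdvdT h
          · exact absurd (hU p hpp h) (by omega)
        have hrec := ih (p + 1) T U (by omega) (by omega) (by omega) hTU
          (fun r hr hrd => by
            have h1 : p ≤ r := hT r hr hrd
            have h2 : r ≠ p := fun he => hdvdT (he ▸ hrd)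
            omega)
          (fun r hr hrd => by have := hU r hr hrd; omega)
        rw [pv_filter_lt_succ_of_not_mem Q p hnotmem] at hrec
        have hcastp : ((p:ℤ) + 1) = ((p + 1 : ℕ) : ℤ) := by push_cast; ring
        rw [hcastp]
        exact hrec
    · -- loop exits
      have hloopZ : ¬ ((p:ℤ) * (p:ℤ) ≤ (T:ℤ)) := by exact_mod_cast hloop
      rw [if_neg hloopZ]
      by_cases hT1 : T = 1
      · subst hT1
        rw [if_neg (by norm_num)]
        have hall : Q.primeFactors.filter (· < p) = Q.primeFactors := by
          apply Finset.filter_true_of_mem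
          intro r hr
          obtain ⟨hrp, hrQ, _⟩ := Nat.mem_primeFactors.mp hr
          rw [← hTU, one_mul] at hrQ
          exact hU r hrp hrQ
        rw [hall]
      · have hTgt : 1 < T := by omega
        rw [if_pos (by exact_mod_cast hTgt)]
        have hTprime : T.Prime := by
          by_contra hnp
          have hmf := Nat.minFac_prime hT1
          have hmfd : T.minFac ∣ T := Nat.minFac_dvd T
          have hge : p ≤ T.minFac := hT _ hmf hmfd
          have hsq : T.minFac ^ 2 ≤ T := Nat.minFac_sq_le_self (by omega) hnp
          nlinarith
        have hpT : p ≤ T := hT T hTprime dvd_rfl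
        have hTU' : ¬ T ∣ U := fun hd => absurd (hU T hTprime hd) (by omega)
        have hfacQ : Q.factorization T = 1 := by
          rw [← hTU, Nat.factorization_mul (by omega) (by omega)]
          simp [hTprime.factorization_self, Nat.factorization_eq_zero_of_not_dvd hTU']
        have hmemT : T ∈ Q.primeFactors := Nat.mem_primeFactors.mpr ⟨hTprime, hTdvdQ, by omega⟩
        have hsplit : Q.primeFactors = insert T (Q.primeFactors.filter (· < p)) := by
          ext r
          simp only [Finset.mem_insert, Finset.mem_filter]
          constructor
          · intro hr
            obtain ⟨hrp, hrQ, _⟩ := Nat.mem_primeFactors.mp hr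
            rw [← hTU] at hrQ
            rcases (Nat.Prime.dvd_mul hrp).mp hrQ with h | h
            · exact Or.inl ((Nat.prime_dvd_prime_iff_eq hrp hTprime).mp h)
            · exact Or.inr ⟨hr, hU r hrp h⟩
          · rintro (h | ⟨h, _⟩)
            · exact h ▸ hmemT
            · exact h
        have hTnotmem : T ∉ Q.primeFactors.filter (· < p) := by
          simp only [Finset.mem_filter]
          rintro ⟨_, hlt⟩
          omega
        have hRHS : ∏ r ∈ Q.primeFactors, pvLocal r (Q.factorization r) (G.factorization r)
            = pvLocal T 1 (G.factorization T) *
              ∏ r ∈ Q.primeFactors.filter (· < p),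
                pvLocal r (Q.factorization r) (G.factorization r) := by
          conv_lhs => rw [hsplit]
          rw [Finset.prod_insert hTnotmem, hfacQ]
        by_cases hdvdG : T ∣ G
        · rw [if_pos ((pv_mod_natCast_eq_zero' _ _).mpr hdvdG)]
          have hcG : G.factorization T = 1 := by
            have h1 : 1 ≤ G.factorization T :=
              (hTprime.pow_dvd_iff_le_factorization (by omega)).mp (by simpa using hdvdG)
            have h2 : G.factorization T ≤ Q.factorization T :=
              (Nat.factorization_le_iff_dvd (by omega) (by omega)).mpr hGQ T
            omega
          have hloc : pvLocal T 1 1 = (T:ℤ) - 1 := by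
            rw [pvLocal, if_pos rfl]
            simp
          rw [hRHS, hcG, hloc]
          ring
        · rw [if_neg (fun hcon => hdvdG ((pv_mod_natCast_eq_zero' _ _).mp hcon))]
          have hcG : G.factorization T = 0 := Nat.factorization_eq_zero_of_not_dvd hdvdG
          have hloc : pvLocal T 1 0 = -1 := by
            rw [pvLocal, if_neg one_ne_zero]
            simp
          rw [hRHS, hcG, hloc]
          ring

lemma ramanujan_sum_alt_eq_prod (q n : Int) (hq : 1 ≤ q) :
    ramanujan_sum_alt q n =
      ∏ p ∈ q.toNat.primeFactors,
        pvLocal p (q.toNat.factorization p) ((Int.gcd n q).factorization p) := by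
  have hq0 : q ≠ 0 := by omega
  have hG : 1 ≤ Int.gcd n q := by
    have := Int.gcd_pos_of_ne_zero_right n hq0
    omega
  have hdvd : (Int.gcd n q : ℕ) ∣ q.toNat := by
    have h1 : (Int.gcd n q : Int) ∣ q := Int.gcd_dvd_right n q
    have h2 := Int.natAbs_dvd_natAbs.mpr h1
    have h3 : q.natAbs = q.toNat := by omega
    simpa [h3] using h2
  have hqQ : q = ((q.toNat : ℕ) : ℤ) := by omega
  have hsqrt1 : 1 ≤ Nat.sqrt q.toNat := Nat.sqrt_pos.mpr (by omega)
  have hsqrtle : Nat.sqrt q.toNat ≤ q.toNat := Nat.sqrt_le_self q.toNat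
  have hempty : q.toNat.primeFactors.filter (· < 2) = ∅ := by
    apply Finset.filter_false_of_mem
    intro r hr
    have := (Nat.mem_primeFactors.mp hr).1.two_le
    omega
  have h := pvFacLoop_eq q.toNat (Int.gcd n q) (by omega) hG hdvd (q.toNat + 2) 2 q.toNat 1
    (by omega) (by omega) (by omega) (mul_one _)
    (fun r hr _ => hr.two_le)
    (fun r hr hrd => absurd (Nat.le_of_dvd one_pos hrd) (by have := hr.two_le; omega))
  rw [hempty, Finset.prod_empty] at h
  calc ramanujan_sum_alt q n
      = pvFacLoop (q.toNat + 2) ((2:ℕ):ℤ) ((q.toNat : ℕ):ℤ) (Int.gcd n q : ℤ) 1 := by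
        rw [ramanujan_sum_alt, ← hqQ]; norm_num
    _ = _ := h

-- ===== VERDICT (by name: the statement is the Claim_ definition above) =====
theorem ramanujan_sum_spec : Claim_equal_ramanujan_sum := by
  intro q n _ hq
  have hq1 : (1:ℤ) ≤ q := hq
  have hG : 1 ≤ Int.gcd n q := by
    have := Int.gcd_pos_of_ne_zero_right n (by omega : q ≠ 0)
    omega
  have hdvd : (Int.gcd n q : ℕ) ∣ q.toNat := by
    have h1 : (Int.gcd n q : Int) ∣ q := Int.gcd_dvd_right n q
    have h2 := Int.natAbs_dvd_natAbs.mpr h1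
    have h3 : q.natAbs = q.toNat := by omega
    simpa [h3] using h2
  show ramanujan_sum q n = ramanujan_sum_alt q n
  rw [ramanujan_sum_eq_sum q n hq1, ramanujan_sum_alt_eq_prod q n hq1]
  exact pv_identity q.toNat (Int.gcd n q) (by omega) hG hdvd
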